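-- pv_equiv track=rewrite | github.com/lucas-mior/zerdax2-dataset | render.py | get_missing_pieces
-- ===== SOURCE A (Python) =====
-- def get_missing_pieces(fen):
--     pieces = list("KkQqBbBbNnNnRrRrPPPPPPPPpppppppp")
--     board = list(''.join(filter(str.isalpha, fen)))
--     for piece in board:
--         try:
--             pieces.remove(piece)
--         except ValueError:
--             pass
--     return pieces
-- ===== SOURCE B (Python) =====
-- def get_missing_pieces(fen):
--     counts = {}
--     for ch in fen:
--         if ch.isalpha():
--             counts[ch] = counts.get(ch, 0) + 1
--     missing = []
--     for piece in "KkQqBbBbNnNnRrRrPPPPPPPPpppppppp":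
--         if counts.get(piece, 0) > 0:
--             counts[piece] -= 1
--         else:
--             missing.append(piece)
--     return missing
-- ===== Notes on version B (the rewrite author's own statement) =====
-- stated objective: faster
-- what changed: A repeatedly mutates a 32-piece list with list.remove (a scan of the piece list per board character); B builds a count dictionary of the board's alphabetic characters in one pass and then does a single template-driven pass, consuming a count when positive and appending the piece to the result otherwise.
import Mathlib
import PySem

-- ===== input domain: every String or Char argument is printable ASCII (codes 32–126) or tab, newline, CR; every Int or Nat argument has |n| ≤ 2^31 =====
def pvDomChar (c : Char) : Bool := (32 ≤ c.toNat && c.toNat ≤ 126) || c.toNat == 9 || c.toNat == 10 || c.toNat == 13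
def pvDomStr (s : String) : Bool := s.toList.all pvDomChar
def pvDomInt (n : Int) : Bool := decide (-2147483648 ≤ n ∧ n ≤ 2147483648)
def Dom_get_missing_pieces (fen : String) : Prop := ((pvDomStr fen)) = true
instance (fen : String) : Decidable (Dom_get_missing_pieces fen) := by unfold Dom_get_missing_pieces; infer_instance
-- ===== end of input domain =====

-- B replaces A's repeated list.remove scans by one counting pass over fen and one
-- template-driven pass (objective: alternative decomposition, same result).

-- ===== PORT A =====
-- pieces = list("KkQq…"); board = list of alphabetic chars of fen (as 1-char strings);
-- for each board char, pieces.remove(piece) with ValueError ignored.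
def get_missing_pieces (fen : String) : List String :=
  let pieces : List String := "KkQqBbBbNnNnRrRrPPPPPPPPpppppppp".toList.map (fun c => String.ofList [c])
  let board : List String := (fen.toList.filter (fun c => PySem.Chars.isalpha c)).map (fun c => String.ofList [c])
  board.foldl (fun ps p =>
    match PySem.List.remove? ps p with
    | some l => l          -- pieces.remove(piece) succeeded
    | none   => ps)        -- ValueError: pass
    pieces

-- ===== PORT B =====
-- counts: dict built in one pass over fen; then one pass over the template string's
-- 1-char pieces, consuming a count when positive, otherwise appending to missing.
def get_missing_pieces_alt (fen : String) : List String :=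
  let counts : PySem.Dict String Int :=
    fen.toList.foldl (fun d c =>
      if PySem.Chars.isalpha c then
        d.insert (String.ofList [c]) (d.getD (String.ofList [c]) 0 + 1)
      else d) PySem.Dict.empty
  let st := ("KkQqBbBbNnNnRrRrPPPPPPPPpppppppp".toList.map (fun c => String.ofList [c])).foldl
    (fun (st : PySem.Dict String Int × List String) piece =>
      if st.1.getD piece 0 > 0 then
        (st.1.insert piece (st.1.getD piece 0 - 1), st.2)
      else
        (st.1, st.2 ++ [piece])) (counts, [])
  st.2

-- ===== PRECONDITION & SPEC =====
def Spec_get_missing_pieces (fen : String) (out : List String) : Prop := out = get_missing_pieces_alt fen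
instance (fen : String) (out : List String) : Decidable (Spec_get_missing_pieces fen out) := by unfold Spec_get_missing_pieces; infer_instance

-- ===== CLAIM (what is proved, stated in full; the proofs are below) =====
def Claim_equal_get_missing_pieces : Prop := ∀ (fen : String), Dom_get_missing_pieces fen → Spec_get_missing_pieces fen (get_missing_pieces fen)

-- ===== LEMMAS AND PROOFS =====

-- A's loop body is exactly List.erase (remove first occurrence, no-op when absent).
theorem removeStep_eq_erase (ps : List String) (p : String) :
    (match PySem.List.remove? ps p with | some l => l | none => ps) = ps.erase p := by
  by_cases h : p ∈ ps
  · rw [PySem.List.remove?_eq_some_erase ps p h]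
  · rw [(PySem.List.remove?_eq_none_iff ps p).mpr h, List.erase_of_not_mem h]

-- B's counting pass holds the multiset counts of A's board list.
theorem counts_aux (l : List Char) :
    ∀ (d : PySem.Dict String Int) (v : String),
    (l.foldl (fun d c =>
      if PySem.Chars.isalpha c then
        d.insert (String.ofList [c]) (d.getD (String.ofList [c]) 0 + 1)
      else d) d).getD v 0
      = d.getD v 0 + (((l.filter (fun c => PySem.Chars.isalpha c)).map (fun c => String.ofList [c])).count v : Int) := by
  induction l with
  | nil => intro d v; simp
  | cons c l ih =>
    intro d v
    by_cases hc : PySem.Chars.isalpha c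
    · simp only [List.foldl_cons, List.filter_cons, hc, if_true, List.map_cons]
      rw [ih, PySem.Dict.getD_insert]
      by_cases hv : v = String.ofList [c]
      · rw [if_pos hv, hv]; simp; ring
      · rw [if_neg hv]
        have hv' : ¬ String.ofList [c] = v := fun h => hv (Eq.symm h)
        simp [hv']
    · simp only [List.foldl_cons, List.filter_cons, hc]
      exact ih d v

-- B's template loop, run with a dict holding the counts of b, computes acc ++ t.diff b.
theorem loop_diff (t : List String) :
    ∀ (d : PySem.Dict String Int) (b acc : List String),
    (∀ v, d.getD v 0 = (b.count v : Int)) →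
    (t.foldl (fun (st : PySem.Dict String Int × List String) piece =>
        if st.1.getD piece 0 > 0 then
          (st.1.insert piece (st.1.getD piece 0 - 1), st.2)
        else
          (st.1, st.2 ++ [piece])) (d, acc)).2 = acc ++ t.diff b := by
  induction t with
  | nil => intro d b acc _; simp
  | cons c t ih =>
    intro d b acc hd
    by_cases hc : d.getD c 0 > 0
    · have hmem : c ∈ b := by
        by_contra hnm
        have := hd c
        rw [List.count_eq_zero_of_not_mem hnm] at this
        omega
      simp only [List.foldl_cons, if_pos hc]
      rw [ih (d.insert c (d.getD c 0 - 1)) (b.erase c) acc ?_, List.cons_diff, if_pos hmem]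
      intro v
      rw [PySem.Dict.getD_insert]
      by_cases hv : v = c
      · subst hv
        rw [if_pos rfl, hd v, List.count_erase_self]
        have hcnt : 0 < b.count v := by
          have := hd v
          by_contra h0
          rw [List.count_eq_zero_of_not_mem (by simpa using List.count_eq_zero.mp (by omega))] at this
          omega
        omega
      · rw [if_neg hv, hd v, List.count_erase_of_ne hv]
    · have hnm : c ∉ b := by
        intro hm
        have := hd c
        have := List.count_pos_iff.mpr hm
        omega
      simp only [List.foldl_cons, if_neg hc]
      rw [ih d b (acc ++ [c]) hd, List.cons_diff, if_neg hnm, List.append_assoc]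
      simp

-- ===== VERDICT (by name: the statement is the Claim_ definition above) =====
theorem get_missing_pieces_spec : Claim_equal_get_missing_pieces := by
  intro fen _
  unfold Spec_get_missing_pieces get_missing_pieces get_missing_pieces_alt
  simp only [removeStep_eq_erase]
  rw [← List.diff_eq_foldl,
      loop_diff _ _ ((fen.toList.filter (fun c => PySem.Chars.isalpha c)).map (fun c => String.ofList [c])) []
        (fun v => by rw [counts_aux]; simp)]
  simp
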